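-- pv_equiv track=rewrite | github.com/rtanubra/interesting_algos | Recursion_Madness/Simple/problem6.py | array6
-- ===== SOURCE A (Python) =====
-- def array6(arr):
--     #base case
--     if len(arr) == 1:
--         if arr[0] == 6:
--             return True
--         else:
--             return False
--     else:
--         check = arr[0]
--         new_arr = arr[1:len(arr)]
--         if check == 6 :
--             return True
--         else:
--             return array6(new_arr)
-- ===== SOURCE B (Python) =====
-- def array6(arr):
--     # Idiomatic membership test; on the empty list (where A raises IndexError) this returns False.
--     return 6 in arr
-- ===== Notes on version B (the rewrite author's own statement) =====
-- stated objective: idiomatic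
-- what changed: Replaces the head-check-and-recurse-on-tail linear recursion with Python's built-in membership test '6 in arr'.
-- outside the precondition, e.g. on array6([]): A raises IndexError, B returns False
import Mathlib
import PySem

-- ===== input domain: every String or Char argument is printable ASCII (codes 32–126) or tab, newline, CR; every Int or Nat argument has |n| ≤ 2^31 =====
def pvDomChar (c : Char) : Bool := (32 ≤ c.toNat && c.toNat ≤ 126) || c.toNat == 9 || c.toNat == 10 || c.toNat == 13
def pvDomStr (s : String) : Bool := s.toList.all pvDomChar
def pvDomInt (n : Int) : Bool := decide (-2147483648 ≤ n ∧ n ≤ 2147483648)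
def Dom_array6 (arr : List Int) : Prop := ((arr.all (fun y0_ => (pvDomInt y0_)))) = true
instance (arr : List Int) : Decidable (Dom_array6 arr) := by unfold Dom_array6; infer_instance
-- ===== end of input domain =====

-- B replaces A's head-check/recurse-on-tail recursion with a single membership test; return value only.

-- ===== PORT A =====
-- Literal transliteration of A: base case len(arr)==1 compares arr[0] to 6;
-- otherwise check = arr[0], recurse on arr[1:len(arr)] (the tail).
-- On [] Python's arr[0] raises IndexError; the [] branch is outside Pre_array6.
def array6 (arr : List Int) : Bool :=
  match arr with
  | [] => false          -- unreachable under Pre_array6 (Python raises IndexError here)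
  | x :: rest =>
    if (x :: rest).length = 1 then
      if x == 6 then true else false
    else
      if x == 6 then true else array6 rest

-- ===== PORT B =====
-- '6 in arr'
def array6_alt (arr : List Int) : Bool := arr.contains 6

-- ===== PRECONDITION & SPEC =====
-- Pre_ excludes the empty list, on which A raises IndexError.
def Pre_array6 (arr : List Int) : Prop := arr ≠ []
instance (arr : List Int) : Decidable (Pre_array6 arr) := by unfold Pre_array6; infer_instance
def pvWitness_array6 : List Int := ([1, 6, 2])

def Spec_array6 (arr : List Int) (out : Bool) : Prop := out = array6_alt arr
instance (arr : List Int) (out : Bool) : Decidable (Spec_array6 arr out) := by unfold Spec_array6; infer_instance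

-- ===== CLAIM (what is proved, stated in full; the proofs are below) =====
def Claim_equal_array6 : Prop := ∀ (arr : List Int), Dom_array6 arr → Pre_array6 arr → Spec_array6 arr (array6 arr)

-- ===== LEMMAS AND PROOFS =====
theorem array6_eq_contains (arr : List Int) (h : arr ≠ []) : array6 arr = arr.contains 6 := by
  induction arr with
  | nil => exact absurd rfl h
  | cons x rest ih =>
    cases rest with
    | nil =>
      show (if x == 6 then true else false) = _
      by_cases hx : x = 6
      · simp [hx]
      · simp [hx, Ne.symm hx]
    | cons y t =>
      by_cases hx : x = 6
      · simp [array6, hx]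
      · have h1 : array6 (x :: y :: t) = array6 (y :: t) := by simp [array6, hx]
        have h2 : (6:Int) ≠ x := fun he => hx he.symm
        rw [h1, ih (by simp)]
        simp [h2]

-- ===== VERDICT (by name: the statement is the Claim_ definition above) =====
theorem array6_spec : Claim_equal_array6 := by
  intro arr _ hpre
  unfold Spec_array6 array6_alt
  exact array6_eq_contains arr hpre
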